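-- pv_equiv track=rewrite | github.com/pypi-data/pypi-mirror-401 | packages/psannlm/psannlm-0.12.2.tar.gz/psannlm-0.12.2/lm/models/transformer_geosparse.py | _auto_shape
-- ===== SOURCE A (Python) =====
-- import math
-- from typing import List, Optional, Sequence, Tuple
--
-- def _auto_shape(n: int) -> Tuple[int, int]:
--     """Pick a (H,W) factorization for n that is as square as possible."""
--     if n <= 0:
--         raise ValueError("n must be positive")
--     root = int(math.isqrt(n))
--     for h in range(root, 0, -1):
--         if n % h == 0:
--             return (h, n // h)
--     return (1, n)
-- ===== SOURCE B (Python) =====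
-- import math
--
-- def _auto_shape(n):
--     """Pick a (H,W) factorization for n that is as square as possible."""
--     if n <= 0:
--         raise ValueError("n must be positive")
--     # build the table of all divisors of n by paired enumeration up to sqrt(n)
--     divs = []
--     d = 1
--     while d * d <= n:
--         if n % d == 0:
--             divs.append(d)
--             divs.append(n // d)
--         d += 1
--     # select the largest divisor not exceeding isqrt(n)
--     root = math.isqrt(n)
--     h = max(x for x in divs if x <= root)
--     return (h, n // h)
-- ===== Notes on version B (the rewrite author's own statement) =====
-- stated objective: alternative
-- what changed: A scans downward from isqrt(n) and returns at the first divisor hit; B instead builds the full divisor table of n by paired enumeration (d and n//d for d*d <= n) and then selects the largest divisor not exceeding isqrt(n) in a separate max pass.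
import Mathlib
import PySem

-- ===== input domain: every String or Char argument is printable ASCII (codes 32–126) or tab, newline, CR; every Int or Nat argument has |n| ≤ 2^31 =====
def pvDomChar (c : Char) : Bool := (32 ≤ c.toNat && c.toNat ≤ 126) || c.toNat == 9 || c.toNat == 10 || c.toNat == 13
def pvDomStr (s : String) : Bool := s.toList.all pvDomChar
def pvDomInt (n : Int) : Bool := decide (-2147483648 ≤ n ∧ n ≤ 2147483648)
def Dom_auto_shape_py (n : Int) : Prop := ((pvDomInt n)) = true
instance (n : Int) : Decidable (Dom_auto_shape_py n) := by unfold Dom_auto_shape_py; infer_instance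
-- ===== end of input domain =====

-- B replaces A's downward first-hit scan by building the divisor table of n (paired
-- enumeration up to sqrt n) and then selecting the largest divisor ≤ isqrt(n): an
-- alternative decomposition of the same O(sqrt n) task.

-- ===== PORT A =====
-- A's for-loop: return at the first h in [root, root-1, …, 1] with n % h == 0
def autoShapeLoopA (n : Int) : List Int → Int × Int
  | [] => (1, n)
  | h :: rest =>
    if PySem.Int.mod n h = 0 then (h, PySem.Int.floordiv n h)
    else autoShapeLoopA n rest

def auto_shape_py (n : Int) : Int × Int :=
  if n ≤ 0 then (0, 0)  -- Python raises ValueError here (excluded by Pre_)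
  else
    let root : Int := (Nat.sqrt n.toNat : Int)  -- int(math.isqrt(n))
    autoShapeLoopA n (PySem.List.pyRange root 0 (-1))

-- ===== PORT B =====
-- B's while-loop: append the divisor pair d, n // d for d = 1, 2, … while d*d ≤ n
def autoShapeDivs (n : Int) : Nat → Int → List Int → List Int
  | 0, _, divs => divs  -- fuel guard only; the loop stops via d*d > n after ≤ n steps
  | fuel + 1, d, divs =>
    if d * d ≤ n then
      autoShapeDivs n fuel (d + 1)
        (if PySem.Int.mod n d = 0 then divs ++ [d, PySem.Int.floordiv n d] else divs)
    else divs

def auto_shape_py_alt (n : Int) : Int × Int :=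
  if n ≤ 0 then (0, 0)  -- Python raises ValueError here (excluded by Pre_)
  else
    let divs := autoShapeDivs n (n.toNat + 1) 1 []
    let root : Int := (Nat.sqrt n.toNat : Int)  -- int(math.isqrt(n))
    match PySem.List.max? (divs.filter (fun x => decide (x ≤ root))) (fun y => y) with
    | some h => (h, PySem.Int.floordiv n h)
    | none => (1, n)  -- unreachable for n ≥ 1 (1 is always a collected divisor ≤ root)

-- ===== PRECONDITION & SPEC =====
-- A raises ValueError exactly on n ≤ 0; Pre_ admits every input A returns on.
def Pre_auto_shape_py (n : Int) : Prop := 0 < n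
instance (n : Int) : Decidable (Pre_auto_shape_py n) := by unfold Pre_auto_shape_py; infer_instance
def pvWitness_auto_shape_py : Int := (12)

def Spec_auto_shape_py (n : Int) (out : Int × Int) : Prop := out = auto_shape_py_alt n
instance (n : Int) (out : Int × Int) : Decidable (Spec_auto_shape_py n out) := by unfold Spec_auto_shape_py; infer_instance

-- ===== CLAIM (what is proved, stated in full; the proofs are below) =====
def Claim_equal_auto_shape_py : Prop := ∀ (n : Int), Dom_auto_shape_py n → Pre_auto_shape_py n → Spec_auto_shape_py n (auto_shape_py n)

-- ===== LEMMAS AND PROOFS =====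

-- the value A's scan finds: the largest divisor of n in [1, h]
def pvBest (n h : Int) : Int :=
  if h ≤ 1 then 1
  else if PySem.Int.mod n h = 0 then h
  else pvBest n (h - 1)
termination_by h.toNat
decreasing_by omega

theorem pvBest_spec (k : Nat) (n h : Int) (hh : 1 ≤ h) (hk : h.toNat ≤ k) :
    pvBest n h ∣ n ∧ 1 ≤ pvBest n h ∧ pvBest n h ≤ h ∧
      ∀ x, pvBest n h < x → x ≤ h → ¬ x ∣ n := by
  induction k generalizing h with
  | zero => omega
  | succ k ih =>
    rw [pvBest]
    by_cases h1 : h ≤ 1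
    · have : h = 1 := le_antisymm h1 hh
      simp only [if_pos h1]
      refine ⟨one_dvd n, le_refl 1, hh, ?_⟩
      intro x hx1 hx2 _
      omega
    · simp only [if_neg h1]
      by_cases hm : PySem.Int.mod n h = 0
      · simp only [if_pos hm]
        refine ⟨(PySem.Int.mod_eq_zero_iff_dvd n h).mp hm, by omega, le_refl h, ?_⟩
        intro x hx1 hx2 _
        omega
      · simp only [if_neg hm]
        obtain ⟨d1, d2, d3, d4⟩ := ih (h - 1) (by omega) (by omega)
        refine ⟨d1, d2, by omega, ?_⟩
        intro x hx1 hx2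
        by_cases hxh : x = h
        · subst hxh
          intro hdvd
          exact hm ((PySem.Int.mod_eq_zero_iff_dvd n x).mpr hdvd)
        · exact d4 x hx1 (by omega)

theorem loopA_eq (k : Nat) (n h : Int) (hh : 1 ≤ h) (hk : h.toNat ≤ k) :
    autoShapeLoopA n (PySem.List.pyRange h 0 (-1)) =
      (pvBest n h, PySem.Int.floordiv n (pvBest n h)) := by
  induction k generalizing h with
  | zero => omega
  | succ k ih =>
    rw [PySem.List.pyRange_neg_one_cons (by omega : (0:Int) < h)]
    simp only [autoShapeLoopA]
    rw [pvBest]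
    by_cases h1 : h ≤ 1
    · have he : h = 1 := le_antisymm h1 hh
      subst he
      have hm : PySem.Int.mod n 1 = 0 := by
        rw [PySem.Int.mod_eq_emod_of_pos (by omega : (0:Int) < 1)]
        exact Int.emod_one n
      simp
    · by_cases hm : PySem.Int.mod n h = 0
      · simp [hm, h1]
      · simp only [if_neg hm, if_neg h1]
        exact ih (h - 1) (by omega) (by omega)

-- elements already collected persist through the rest of B's loop
theorem divs_mono (n : Int) (f : Nat) (d : Int) (divs : List Int) (x : Int)
    (hx : x ∈ divs) : x ∈ autoShapeDivs n f d divs := by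
  induction f generalizing d divs with
  | zero => simpa [autoShapeDivs] using hx
  | succ f ih =>
    simp only [autoShapeDivs]
    split_ifs with h1 h2
    · exact ih (d + 1) _ (by simp [hx])
    · exact ih (d + 1) _ (by simp [hx])
    · exact hx

-- everything B collects is a positive divisor of n
theorem divs_sound (n : Int) (hn : 0 < n) (f : Nat) (d : Int) (divs : List Int)
    (hd : 1 ≤ d) (hinv : ∀ y ∈ divs, y ∣ n ∧ 1 ≤ y) :
    ∀ y ∈ autoShapeDivs n f d divs, y ∣ n ∧ 1 ≤ y := by
  induction f generalizing d divs with
  | zero => simpa [autoShapeDivs] using hinv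
  | succ f ih =>
    simp only [autoShapeDivs]
    split_ifs with h1 h2
    · refine ih (d + 1) _ (by omega) ?_
      intro y hy
      rcases List.mem_append.mp hy with hy | hy
      · exact hinv y hy
      · have hdvd : d ∣ n := (PySem.Int.mod_eq_zero_iff_dvd n d).mp h2
        obtain ⟨c, hc⟩ := hdvd
        have hfd : PySem.Int.floordiv n d = c := by
          rw [PySem.Int.floordiv_eq_ediv_of_pos (by omega : (0:Int) < d), hc,
            Int.mul_ediv_cancel_left c (by omega : d ≠ 0)]
        have hc1 : 1 ≤ c := by nlinarith
        rcases List.mem_cons.mp hy with hy | hy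
        · exact hy ▸ ⟨⟨c, hc⟩, hd⟩
        · simp only [List.mem_cons, List.not_mem_nil, or_false] at hy
          exact hy ▸ hfd ▸ ⟨⟨d, by linarith [hc]⟩, by omega⟩
    · exact ih (d + 1) _ (by omega) hinv
    · exact hinv

-- every divisor x with x*x ≤ n is visited and collected, given enough fuel
theorem divs_visit (n : Int) (f : Nat) (d x : Int) (divs : List Int)
    (hd : 1 ≤ d) (hdx : d ≤ x) (hxx : x * x ≤ n) (hm : PySem.Int.mod n x = 0)
    (hf : (x - d).toNat < f) : x ∈ autoShapeDivs n f d divs := by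
  induction f generalizing d divs with
  | zero => omega
  | succ f ih =>
    simp only [autoShapeDivs]
    have hcond : d * d ≤ n := by nlinarith
    rw [if_pos hcond]
    by_cases hde : d = x
    · subst hde
      rw [if_pos hm]
      exact divs_mono n f (d + 1) _ d (by simp)
    · exact ih (d + 1) _ (by omega) (by omega) (by omega)

theorem B_eq (n : Int) (hn : 0 < n) :
    auto_shape_py_alt n =
      (pvBest n (Nat.sqrt n.toNat : Int),
        PySem.Int.floordiv n (pvBest n (Nat.sqrt n.toNat : Int))) := by
  have hnn : ¬ n ≤ 0 := by omega
  set r : Int := (Nat.sqrt n.toNat : Int) with hr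
  have hr1 : 1 ≤ r := by
    have := Nat.sqrt_pos.mpr (show 0 < n.toNat by omega)
    omega
  have hrr : r * r ≤ n := by
    have h := Nat.sqrt_le' n.toNat
    rw [pow_two] at h
    have h2 : ((Nat.sqrt n.toNat * Nat.sqrt n.toNat : Nat) : Int) ≤ ((n.toNat : Nat) : Int) := by
      exact_mod_cast h
    push_cast at h2
    rw [Int.toNat_of_nonneg (by omega : (0:Int) ≤ n)] at h2
    rw [hr]
    exact h2
  have hrn : r ≤ n := by
    have h := Nat.sqrt_le_self n.toNat
    omega
  obtain ⟨g1, g2, g3, g4⟩ := pvBest_spec r.toNat n r hr1 (le_refl _)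
  set g := pvBest n r with hg
  have hgg : g * g ≤ n := by nlinarith
  have hgm : PySem.Int.mod n g = 0 := (PySem.Int.mod_eq_zero_iff_dvd n g).mpr g1
  set divs := autoShapeDivs n (n.toNat + 1) 1 [] with hdivs
  have hmem : g ∈ divs := divs_visit n (n.toNat + 1) 1 g [] (le_refl 1) g2 hgg hgm (by omega)
  have hsound : ∀ y ∈ divs, y ∣ n ∧ 1 ≤ y :=
    divs_sound n hn (n.toNat + 1) 1 [] (le_refl 1) (by simp)
  set cands := divs.filter (fun x => decide (x ≤ r)) with hcands
  have hgc : g ∈ cands := List.mem_filter.mpr ⟨hmem, by simpa using g3⟩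
  have hne : cands ≠ [] := fun h => by simp [h] at hgc
  obtain ⟨m, hmax⟩ : ∃ m, PySem.List.max? cands (fun y => y) = some m := by
    cases hmx : PySem.List.max? cands (fun y => y) with
    | none => exact absurd ((PySem.List.max?_eq_none_iff _ _).mp hmx) hne
    | some m => exact ⟨m, rfl⟩
  have hmmem : m ∈ cands := PySem.List.max?_mem hmax
  have hmle : ∀ y ∈ cands, y ≤ m := fun y hy => PySem.List.max?_isMax hmax y hy
  have hmg : m = g := by
    obtain ⟨hmd, hmr⟩ := List.mem_filter.mp hmmem
    obtain ⟨hmdvd, hm1⟩ := hsound m hmd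
    have hmr' : m ≤ r := by simpa using hmr
    have h1 : m ≤ g := by
      by_contra hlt
      exact g4 m (by omega) hmr' hmdvd
    have h2 : g ≤ m := hmle g hgc
    omega
  simp only [auto_shape_py_alt, if_neg hnn]
  rw [← hr, ← hdivs, ← hcands, hmax, hmg]

-- ===== VERDICT (by name: the statement is the Claim_ definition above) =====
theorem auto_shape_py_spec : Claim_equal_auto_shape_py := by
  intro n _ hpre
  have hn : 0 < n := hpre
  have hnn : ¬ n ≤ 0 := by omega
  show auto_shape_py n = auto_shape_py_alt n
  have hr1 : (1:Int) ≤ (Nat.sqrt n.toNat : Int) := by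
    have := Nat.sqrt_pos.mpr (show 0 < n.toNat by omega)
    omega
  rw [B_eq n hn]
  simp only [auto_shape_py, if_neg hnn]
  exact loopA_eq (Nat.sqrt n.toNat : Int).toNat n _ hr1 (le_refl _)
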